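-- pv_equiv track=rewrite | github.com/Chitrank-Dixit/coding-questions | must_do_questions/day28.py | traversal_DFS
-- ===== SOURCE A (Python) =====
-- directions = [[-1, 0], [0, 1], [1, 0], [0, -1]]
--
-- def dfs(matrix, row, col, seen, values):
--     if (
--         row < 0
--         or col < 0
--         or row >= len(matrix)
--         or col >= len(matrix[0])
--         or seen[row][col]
--     ):
--         return
--     values.append(matrix[row][col])
--     seen[row][col] = True
--
--     for i in range(len(directions)):
--         current_dir = directions[i]
--         dfs(matrix, row + current_dir[0], col + current_dir[1], seen, values)
--
-- def traversal_DFS(matrix):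
--     seen = []
--     for i in range(len(matrix)):
--         current_arr = []
--         for j in range(len(matrix[i])):
--             current_arr.append(False)
--         seen.append(current_arr)
--     values = []
--     dfs(matrix, 0, 0, seen, values)
--     return values
-- ===== SOURCE B (Python) =====
-- def traversal_DFS(matrix):
--     seen = [[False] * len(row) for row in matrix]
--     values = []
--     stack = [(0, 0)]
--     n = len(matrix)
--     while stack:
--         row, col = stack.pop()
--         if row < 0 or col < 0 or row >= n or col >= len(matrix[0]) or seen[row][col]:
--             continue
--         values.append(matrix[row][col])
--         seen[row][col] = True
--         for dr, dc in ((0, -1), (1, 0), (0, 1), (-1, 0)):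
--             stack.append((row + dr, col + dc))
--     return values
-- ===== Notes on version B (the rewrite author's own statement) =====
-- stated objective: alternative
-- what changed: Replaces A's recursive dfs helper with an explicit-stack iterative loop that pushes the four neighbors in reversed direction order and checks/marks seen on pop, reproducing the exact preorder without recursion.
import Mathlib
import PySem

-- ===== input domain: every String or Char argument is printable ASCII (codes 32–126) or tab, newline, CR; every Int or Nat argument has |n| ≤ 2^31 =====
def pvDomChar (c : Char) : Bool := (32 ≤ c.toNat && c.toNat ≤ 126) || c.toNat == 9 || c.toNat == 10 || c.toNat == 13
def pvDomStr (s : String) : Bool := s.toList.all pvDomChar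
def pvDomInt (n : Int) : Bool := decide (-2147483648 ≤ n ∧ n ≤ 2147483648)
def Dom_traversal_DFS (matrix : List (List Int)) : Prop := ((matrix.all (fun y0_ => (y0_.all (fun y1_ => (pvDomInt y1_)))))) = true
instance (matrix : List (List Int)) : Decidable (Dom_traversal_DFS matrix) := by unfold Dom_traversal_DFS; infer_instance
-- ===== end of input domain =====

-- B replaces A's recursive dfs with an explicit-stack loop (neighbors pushed in reversed
-- direction order, seen checked on pop) producing the identical preorder; objective: alternative.

-- ===== PORT A =====
-- shared primitives, used by both ports exactly as both Pythons use them: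
-- seen[row][col] read (bounds already checked by the guard, indices possibly beyond a ragged row)
def pvLook (seen : List (List Bool)) (r c : Int) : Option Bool :=
  (PySem.List.pyGet? seen r).bind (fun row => PySem.List.pyGet? row c)

-- seen[row][col] = True (indices nonnegative at this point in both Pythons)
def pvMark (seen : List (List Bool)) (r c : Nat) : List (List Bool) :=
  seen.set r ((seen.getD r []).set c true)

-- number of unmarked cells; measure for termination (fuel bound for A's port, WF measure for B's)
def pvCF (seen : List (List Bool)) : Nat := (seen.map (fun row => row.count false)).sum

-- A's recursive dfs.  Python's recursion carries no fuel; the fuel here is a pure totality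
-- guard: traversal_DFS calls it with fuel = cell count + 1, which the recursion (each level
-- below the root marks a fresh cell) can never exhaust, so the guard branch is never taken there.
def dfsA (matrix : List (List Int)) : Nat → Int → Int → (List (List Bool) × List Int) → (List (List Bool) × List Int)
  | 0, _, _, s => s
  | fuel+1, r, c, s =>
    if r < 0 ∨ c < 0 ∨ (matrix.length : Int) ≤ r ∨ ((matrix.headD []).length : Int) ≤ c then s
    else
      match pvLook s.1 r c with
      | some false =>
        -- values.append(matrix[row][col]); seen[row][col] = True; then the four directions in order
        let s1 := (pvMark s.1 r.toNat c.toNat, s.2 ++ [(matrix.getD r.toNat []).getD c.toNat 0])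
        dfsA matrix fuel r (c-1) (dfsA matrix fuel (r+1) c (dfsA matrix fuel r (c+1) (dfsA matrix fuel (r-1) c s1)))
      | _ => s  -- seen (some true); none = ragged row, where Python raises (outside Pre_)

def traversal_DFS (matrix : List (List Int)) : List Int :=
  let seen := matrix.map (fun row => row.map (fun _ => false))
  (dfsA matrix (pvCF seen + 1) 0 0 (seen, [])).2

-- ===== PORT B =====
theorem pv_count_set_true (l : List Bool) (j : Nat) (h : j < l.length) (hf : l[j] = false) :
    (l.set j true).count false + 1 = l.count false := by
  induction l generalizing j with
  | nil => simp at h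
  | cons a t ih =>
    cases j with
    | zero => simp at hf; subst hf; simp
    | succ j =>
      have := ih j (by simpa using h) (by simpa using hf)
      simp only [List.set, List.count_cons]
      omega

theorem pv_sum_map_set {α : Type} (f : α → Nat) (l : List α) (i : Nat) (x : α) (h : i < l.length) :
    ((l.set i x).map f).sum + f l[i] = (l.map f).sum + f x := by
  induction l generalizing i with
  | nil => simp at h
  | cons a t ih =>
    cases i with
    | zero => simp; omega
    | succ j =>
      simp only [List.set, List.map_cons, List.sum_cons, List.getElem_cons_succ]
      have := ih j (by simpa using h)
      omega

theorem pvCF_mark_lt (seen : List (List Bool)) (r c : Int)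
    (h : pvLook seen r c = some false) (hr : 0 ≤ r) (hc : 0 ≤ c) :
    pvCF (pvMark seen r.toNat c.toNat) < pvCF seen := by
  unfold pvLook at h
  rw [PySem.List.pyGet?_of_nonneg _ hr] at h
  rcases ho : seen[r.toNat]? with _ | row
  · rw [ho] at h; simp at h
  rw [ho] at h; simp only [Option.bind_some] at h
  rw [PySem.List.pyGet?_of_nonneg _ hc] at h
  have hrlen : r.toNat < seen.length := (List.getElem?_eq_some_iff.mp ho).1
  have hrow : seen[r.toNat] = row := by
    have := (List.getElem?_eq_some_iff.mp ho).2; simpa using this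
  have hclen : c.toNat < row.length := (List.getElem?_eq_some_iff.mp h).1
  have hcell : row[c.toNat] = false := by
    have := (List.getElem?_eq_some_iff.mp h).2; simpa using this
  have hgetD : seen.getD r.toNat [] = row := by
    simp [List.getD, ho]
  unfold pvMark pvCF
  rw [hgetD]
  have hsum := pv_sum_map_set (fun row => row.count false) seen r.toNat (row.set c.toNat true) hrlen
  simp only at hsum
  rw [hrow] at hsum
  have hc1 := pv_count_set_true row c.toNat hclen hcell
  omega

-- the while-loop: stack top = list head; Python pushes the four neighbors in reversed
-- direction order and pops from the end, i.e. prepends them in original order here.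
def runB (matrix : List (List Int)) (stack : List (Int × Int)) (s : List (List Bool) × List Int) : List (List Bool) × List Int :=
  match stack with
  | [] => s
  | (r, c) :: rest =>
    if r < 0 ∨ c < 0 ∨ (matrix.length : Int) ≤ r ∨ ((matrix.headD []).length : Int) ≤ c then
      runB matrix rest s
    else
      match h : pvLook s.1 r c with
      | some false =>
        runB matrix ((r-1, c) :: (r, c+1) :: (r+1, c) :: (r, c-1) :: rest)
          (pvMark s.1 r.toNat c.toNat, s.2 ++ [(matrix.getD r.toNat []).getD c.toNat 0])
      | _ => runB matrix rest s
  termination_by stack.length + 5 * pvCF s.1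
  decreasing_by
  · simp
  · have := pvCF_mark_lt s.1 r c h (by omega) (by omega)
    simp only [List.length_cons]; omega
  · simp

def traversal_DFS_alt (matrix : List (List Int)) : List Int :=
  let seen := matrix.map (fun row => row.map (fun _ => false))
  (runB matrix [(0, 0)] (seen, [])).2

-- ===== PRECONDITION & SPEC =====
-- Pre_ excludes ragged matrices with a row shorter than the first row: there the Python A
-- (and the Python B alike) raises IndexError on seen[row][col].
def Pre_traversal_DFS (matrix : List (List Int)) : Prop :=
  ∀ row ∈ matrix, (matrix.headD []).length ≤ row.length
instance (matrix : List (List Int)) : Decidable (Pre_traversal_DFS matrix) := by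
  unfold Pre_traversal_DFS; infer_instance
def pvWitness_traversal_DFS : List (List Int) := [[1, 2], [3, 4]]

def Spec_traversal_DFS (matrix : List (List Int)) (out : List Int) : Prop := out = traversal_DFS_alt matrix
instance (matrix : List (List Int)) (out : List Int) : Decidable (Spec_traversal_DFS matrix out) := by unfold Spec_traversal_DFS; infer_instance

-- ===== CLAIM (what is proved, stated in full; the proofs are below) =====
def Claim_equal_traversal_DFS : Prop := ∀ (matrix : List (List Int)), Dom_traversal_DFS matrix → Pre_traversal_DFS matrix → Spec_traversal_DFS matrix (traversal_DFS matrix)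

-- ===== LEMMAS AND PROOFS =====

theorem pv_count_set_true_le (l : List Bool) (j : Nat) :
    (l.set j true).count false ≤ l.count false := by
  induction l generalizing j with
  | nil => simp
  | cons a t ih =>
    cases j with
    | zero => cases a <;> simp
    | succ j =>
      simp only [List.set, List.count_cons]
      have := ih j
      omega



theorem pvCF_mark_le (seen : List (List Bool)) (i j : Nat) :
    pvCF (pvMark seen i j) ≤ pvCF seen := by
  unfold pvMark pvCF
  by_cases hi : i < seen.length
  · have hrow' : seen[i] = seen.getD i [] := by
      simp [List.getD, List.getElem?_eq_getElem hi]
    have hsum := pv_sum_map_set (fun row => row.count false) seen i ((seen.getD i []).set j true) hi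
    simp only at hsum
    rw [hrow'] at hsum
    have hc := pv_count_set_true_le (seen.getD i []) j
    omega
  · rw [List.set_eq_of_length_le (by omega)]

theorem dfsA_cf_le (matrix : List (List Int)) (fuel : Nat) :
    ∀ r c s, pvCF (dfsA matrix fuel r c s).1 ≤ pvCF s.1 := by
  induction fuel with
  | zero => intro r c s; simp [dfsA]
  | succ fuel ih =>
    intro r c s
    rw [dfsA]
    split
    · exact le_rfl
    · rcases hl : pvLook s.1 r c with _ | b
      · simp
      · cases b
        · refine le_trans (ih _ _ _) (le_trans (ih _ _ _) (le_trans (ih _ _ _) (le_trans (ih _ _ _) ?_)))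
          exact pvCF_mark_le _ _ _
        · simp

theorem run_cons (matrix : List (List Int)) (fuel : Nat) :
    ∀ r c stack s, pvCF s.1 < fuel →
      runB matrix ((r, c) :: stack) s = runB matrix stack (dfsA matrix fuel r c s) := by
  induction fuel with
  | zero => intro r c stack s hf; omega
  | succ fuel ih =>
    intro r c stack s hf
    by_cases hg : r < 0 ∨ c < 0 ∨ (matrix.length : Int) ≤ r ∨ ((matrix.headD []).length : Int) ≤ c
    · conv_lhs => rw [runB]
      rw [dfsA, if_pos hg, if_pos hg]
    · conv_lhs => rw [runB]
      rw [dfsA, if_neg hg, if_neg hg]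
      rcases hl : pvLook s.1 r c with _ | b
      · rfl
      · cases b
        · have h0r : (0:Int) ≤ r := by omega
          have h0c : (0:Int) ≤ c := by omega
          have hm := pvCF_mark_lt s.1 r c hl h0r h0c
          set s1 : List (List Bool) × List Int :=
            (pvMark s.1 r.toNat c.toNat, s.2 ++ [(matrix.getD r.toNat []).getD c.toNat 0]) with hs1
          have h1 : pvCF s1.1 < fuel := by simp only [hs1]; omega
          have h2 : pvCF (dfsA matrix fuel (r-1) c s1).1 < fuel :=
            lt_of_le_of_lt (dfsA_cf_le matrix fuel _ _ _) h1
          have h3 : pvCF (dfsA matrix fuel r (c+1) (dfsA matrix fuel (r-1) c s1)).1 < fuel :=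
            lt_of_le_of_lt (dfsA_cf_le matrix fuel _ _ _) h2
          have h4 : pvCF (dfsA matrix fuel (r+1) c (dfsA matrix fuel r (c+1) (dfsA matrix fuel (r-1) c s1))).1 < fuel :=
            lt_of_le_of_lt (dfsA_cf_le matrix fuel _ _ _) h3
          rw [ih (r-1) c _ s1 h1, ih r (c+1) _ _ h2, ih (r+1) c _ _ h3, ih r (c-1) _ _ h4]
        · rfl

-- ===== VERDICT (by name: the statement is the Claim_ definition above) =====
theorem traversal_DFS_spec : Claim_equal_traversal_DFS := by
  intro matrix _ _
  unfold Spec_traversal_DFS traversal_DFS traversal_DFS_alt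
  dsimp only
  rw [run_cons matrix (pvCF (matrix.map (fun row => row.map (fun _ => false))) + 1) 0 0 [] _ (Nat.lt_succ_self _)]
  rw [runB]
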